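-- pv_equiv track=rewrite | github.com/LasyaSriVanga/Litcoder | main/Contests/Module_2/Maximum_OR.py | max_bwor
-- ===== SOURCE A (Python) =====
-- def max_bwor(nums, k):
--     for _ in range(k):
--         max_unb = -1
--         tar_index = -1
--
--         for i, num in enumerate(nums):
--             b_rep = bin(num)[2:][::-1]
--             ubi = b_rep.find('0')
--
--             if ubi > max_unb:
--                 max_unb = ubi
--                 tar_index = i
--
--         if max_unb == -1:
--             break
--         nums[tar_index] *= 2
--
--     res = 0
--     for num in nums:
--         res |= num
--     return res
-- ===== SOURCE B (Python) =====
-- def max_bwor(nums, k):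
--     # Alternative algorithm: instead of re-scanning all n binary strings on each of
--     # the k rounds, note that the greedy target order is fixed up front:
--     # - doubling any value makes it even, so its lowest-zero-bit index drops to 0;
--     # - hence the rounds first double, once each, the elements whose lowest-zero-bit
--     #   index is > 0, in order of (descending index, ascending position),
--     # - and every remaining round doubles the first element whose index is >= 0.
--     # Mutates nums in place exactly like A does.
--     def ubi(n):
--         # lowest zero bit of abs(n) within its bit length, -1 if all ones
--         m = abs(n)
--         if m == 0:
--             return 0
--         z = ((m ^ (m + 1)) + 1).bit_length() - 2  # trailing-ones count of m
--         return z if z < m.bit_length() else -1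
--
--     cand = [(-u, i) for i, x in enumerate(nums) if (u := ubi(x)) > 0]
--     cand.sort()
--     steps = min(k, len(cand)) if k > 0 else 0
--     for _, i in cand[:steps]:
--         nums[i] *= 2
--     rem = k - steps
--     if rem > 0:
--         zeros = [i for i, x in enumerate(nums) if ubi(x) >= 0]
--         if zeros:
--             nums[zeros[0]] <<= rem
--
--     res = 0
--     for num in nums:
--         res |= num
--     return res
-- ===== Notes on version B (the rewrite author's own statement) =====
-- stated objective: faster
-- what changed: Instead of rescanning every element's binary string on each of the k rounds, B computes each element's lowest-zero-bit index once arithmetically, sorts the positive-index candidates to get the whole doubling order up front, doubles each once, and applies all remaining rounds as a single shift of the first element with index >= 0.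
import Mathlib
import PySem

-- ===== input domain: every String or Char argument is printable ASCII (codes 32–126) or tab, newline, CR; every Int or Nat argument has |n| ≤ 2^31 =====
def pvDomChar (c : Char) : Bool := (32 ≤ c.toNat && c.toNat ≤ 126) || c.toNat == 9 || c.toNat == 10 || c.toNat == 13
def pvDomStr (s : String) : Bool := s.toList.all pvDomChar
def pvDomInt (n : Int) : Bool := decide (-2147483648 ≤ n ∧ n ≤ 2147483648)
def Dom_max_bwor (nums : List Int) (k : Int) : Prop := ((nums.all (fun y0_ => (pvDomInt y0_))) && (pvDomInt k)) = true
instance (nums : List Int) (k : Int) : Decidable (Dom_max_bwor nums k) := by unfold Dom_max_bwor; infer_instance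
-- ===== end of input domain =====

-- B replaces A's k rounds of rescanning every element's binary string by computing each
-- element's lowest-zero-bit index once, sorting the candidates to fix the whole doubling
-- order up front, and collapsing all leftover rounds into one shift (objective: faster).
-- Both A and B mutate `nums` in place identically in Python; the theorem is about the
-- return value (the ports are pure).

-- ===== PORT A =====
-- bin(num)[2:][::-1].find('0')   (bin = PySem.Int.toBinChars0b; [::-1] = reverse, cf. slice?_none_none_neg_one)
def ubiA (num : Int) : Int :=
  let s := PySem.Int.toBinChars0b num
  let s2 := PySem.List.slice s (some 2) none
  let b_rep := s2.reverse
  PySem.Chars.find b_rep ['0']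

-- the inner `for i, num in enumerate(nums)` loop computing (max_unb, tar_index)
def scanA (nums : List Int) : Int × Int :=
  (PySem.List.enumerate nums).foldl
    (fun acc p => if ubiA p.2 > acc.1 then (ubiA p.2, p.1) else acc) (-1, -1)

-- the outer `for _ in range(k)` loop with its early `break`; when max_unb ≠ -1
-- tar_index is a valid index, so the total pyGetD/pySetD forms are exact
def loopA : Nat → List Int → List Int
  | 0, nums => nums
  | f+1, nums =>
    let m := scanA nums
    if m.1 = -1 then nums
    else loopA f (PySem.List.pySetD nums m.2 (PySem.List.pyGetD nums m.2 0 * 2))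

def max_bwor (nums : List Int) (k : Int) : Int :=
  (loopA k.toNat nums).foldl (fun res num => PySem.Int.bor res num) 0

-- ===== PORT B =====
-- B's ubi: lowest zero bit of abs(n) within its bit length via trailing-ones count
-- ((m ^ (m+1)) + 1).bit_length() - 2; bin/bit ops are PySem.Int.bxor / bitLength
def ubiB (n : Int) : Int :=
  let m : Int := (n.natAbs : Int)
  if m = 0 then 0
  else
    let z : Int := (PySem.Int.bitLength (PySem.Int.bxor m (m + 1) + 1) : Int) - 2
    if z < (PySem.Int.bitLength m : Int) then z else -1

def max_bwor_alt (nums : List Int) (k : Int) : Int :=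
  let cand := (PySem.List.enumerate nums).filterMap
    (fun p => if ubiB p.2 > 0 then some (-(ubiB p.2), p.1) else none)
  let cand := PySem.List.sorted cand (fun q => toLex q) false  -- cand.sort(): Python tuple order is lexicographic
  let steps : Int := if k > 0 then min k (PySem.List.len cand) else 0
  let nums1 := (PySem.List.slice cand none (some steps)).foldl
    (fun ns q => PySem.List.pySetD ns q.2 (PySem.List.pyGetD ns q.2 0 * 2)) nums
  let rem := k - steps
  let nums2 :=
    if rem > 0 then
      let zeros := (PySem.List.enumerate nums1).filterMap
        (fun p => if ubiB p.2 ≥ 0 then some p.1 else none)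
      match zeros with
      | [] => nums1
      | j :: _ => PySem.List.pySetD nums1 j (PySem.List.pyGetD nums1 j 0 <<< rem.toNat)
    else nums1
  nums2.foldl (fun res num => PySem.Int.bor res num) 0

-- ===== PRECONDITION & SPEC =====
def Spec_max_bwor (nums : List Int) (k : Int) (out : Int) : Prop := out = max_bwor_alt nums k
instance (nums : List Int) (k : Int) (out : Int) : Decidable (Spec_max_bwor nums k out) := by unfold Spec_max_bwor; infer_instance

-- ===== CLAIM (what is proved, stated in full; the proofs are below) =====
def Claim_equal_max_bwor : Prop := ∀ (nums : List Int) (k : Int), Dom_max_bwor nums k → Spec_max_bwor nums k (max_bwor nums k)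

-- ===== LEMMAS AND PROOFS =====

/-! ### ubiA = ubiB -/

-- the binary digit string Nat.toDigits 2 produces, as a structural recursion
def bits2 (n : Nat) : List Char :=
  if h : n / 2 = 0 then [Nat.digitChar (n % 2)]
  else bits2 (n / 2) ++ [Nat.digitChar (n % 2)]
  termination_by n
  decreasing_by
    have hm : n ≠ 0 := by rintro rfl; simp at h
    exact Nat.div_lt_self (Nat.pos_of_ne_zero hm) one_lt_two

theorem toDigitsCore_eq_bits2 : ∀ (f n : Nat) (l : List Char), n < f →
    Nat.toDigitsCore 2 f n l = bits2 n ++ l := by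
  intro f
  induction f with
  | zero => omega
  | succ f ih =>
    intro n l hn
    rw [Nat.toDigitsCore, bits2]
    by_cases h2 : n / 2 = 0
    · simp [h2]
    · simp only [h2, if_false]
      rw [ih (n / 2) _ (by omega)]
      simp

theorem toDigits_eq_bits2 (n : Nat) : Nat.toDigits 2 n = bits2 n := by
  have := toDigitsCore_eq_bits2 (n + 1) n [] (by omega)
  simpa [Nat.toDigits] using this

theorem find_go_shift (l : List Char) : ∀ k : Nat,
    PySem.Chars.find.go ['0'] l k =
      (if PySem.Chars.find.go ['0'] l 0 = -1 then -1 else PySem.Chars.find.go ['0'] l 0 + k) := by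
  induction l with
  | nil => intro k; simp [PySem.Chars.find.go]
  | cons c t ih =>
    intro k
    by_cases hp : (['0'] : List Char).isPrefixOf (c :: t)
    · simp [PySem.Chars.find.go, hp]
    · have hge : (-1 : Int) ≤ PySem.Chars.find.go ['0'] t 0 := by
        have := PySem.Chars.neg_one_le_find t ['0']
        simpa [PySem.Chars.find] using this
      simp only [PySem.Chars.find.go, hp]
      rw [ih (k + 1), ih 1]
      by_cases h0 : PySem.Chars.find.go ['0'] t 0 = -1 <;> simp [h0] <;> omega

theorem find_cons_zero (l : List Char) : PySem.Chars.find ('0' :: l) ['0'] = 0 := by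
  simp [PySem.Chars.find, PySem.Chars.find.go, List.isPrefixOf]

theorem find_cons_ne (c : Char) (l : List Char) (hc : c ≠ '0') :
    PySem.Chars.find (c :: l) ['0'] =
      (if PySem.Chars.find l ['0'] = -1 then -1 else PySem.Chars.find l ['0'] + 1) := by
  have hp : (['0'] : List Char).isPrefixOf (c :: l) = false := by
    simp [List.isPrefixOf]
    intro h; exact absurd h.symm hc
  simp only [PySem.Chars.find, PySem.Chars.find.go, hp, if_false, Bool.false_eq_true]
  exact find_go_shift l 1

theorem find_append_b (l : List Char) :
    PySem.Chars.find (l ++ ['b']) ['0'] = PySem.Chars.find l ['0'] := by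
  induction l with
  | nil => decide
  | cons c t ih =>
    by_cases hc : c = '0'
    · subst hc; rw [List.cons_append, find_cons_zero, find_cons_zero]
    · rw [List.cons_append, find_cons_ne c _ hc, find_cons_ne c _ hc, ih]

theorem xor_even (a : Nat) : (2*a) ^^^ (2*a+1) = 1 := by
  apply Nat.eq_of_testBit_eq
  intro i
  rw [Nat.testBit_xor]
  cases i with
  | zero => simp [Nat.testBit_zero]
  | succ i =>
    simp only [Nat.testBit_add_one]
    have h1 : (2*a) / 2 = a := by omega
    have h2 : (2*a+1) / 2 = a := by omega
    have h3 : (1:Nat) / 2 = 0 := by norm_num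
    rw [h1, h2, h3, Bool.xor_self]
    simp

theorem xor_odd (a : Nat) : (2*a+1) ^^^ (2*a+2) = 2*(a ^^^ (a+1)) + 1 := by
  apply Nat.eq_of_testBit_eq
  intro i
  rw [Nat.testBit_xor]
  cases i with
  | zero => simp [Nat.testBit_zero]
  | succ i =>
    simp only [Nat.testBit_add_one]
    have h1 : (2*a+1) / 2 = a := by omega
    have h2 : (2*a+2) / 2 = a + 1 := by omega
    have h3 : (2*(a ^^^ (a+1)) + 1) / 2 = a ^^^ (a+1) := by omega
    rw [h1, h2, h3, Nat.testBit_xor]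

-- proof-side abbreviation for the trailing-ones count B computes
def zN (m : Nat) : Int := (PySem.Int.bitLength (((m ^^^ (m+1)) + 1 : Nat) : Int) : Int) - 2

theorem ubiB_of_ne (n : Int) (h : n.natAbs ≠ 0) :
    ubiB n = (if zN n.natAbs < (PySem.Int.bitLength ((n.natAbs : Nat) : Int) : Int) then zN n.natAbs else -1) := by
  rw [ubiB, zN]
  set m := n.natAbs with hm
  have hc : ((m : Int) ≠ 0) := by exact_mod_cast h
  simp only [if_neg hc]
  have h1 : ((m:Int) + 1) = ((m + 1 : Nat) : Int) := by push_cast; ring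
  rw [h1, PySem.Int.bxor_natCast]
  have h2 : ((((m ^^^ (m+1) : Nat)) : Int) + 1) = (((m ^^^ (m+1)) + 1 : Nat) : Int) := by push_cast; ring
  rw [h2]

theorem blN_pos (m : Nat) (h : 0 < m) : 1 ≤ PySem.Int.bitLength (m : Int) := by
  rw [PySem.Int.bitLength_natCast (m := m) h]; omega

theorem zN_nonneg (m : Nat) : 0 ≤ zN m := by
  rw [zN]
  have hx : m ^^^ (m+1) ≠ 0 := by
    intro hc
    have := Nat.xor_eq_zero_iff.mp hc
    omega
  set b := PySem.Int.bitLength (((m ^^^ (m+1)) + 1 : Nat) : Int) with hb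
  have hlt := PySem.Int.lt_two_pow_bitLength (((m ^^^ (m+1)) + 1 : Nat) : Int)
  rw [← hb] at hlt
  have h2 : 2 ≤ (m ^^^ (m+1)) + 1 := by omega
  have hval : ((m ^^^ (m+1)) + 1) < 2 ^ b := by simpa using hlt
  rcases Nat.lt_or_ge b 2 with hb2 | hb2
  · interval_cases b <;> omega
  · omega

theorem zN_even (a : Nat) : zN (2*a) = 0 := by
  rw [zN, xor_even]
  have : ((1 + 1 : Nat) : Int) = ((2 : Nat) : Int) := by norm_num
  rw [this]
  decide

theorem zN_odd (a : Nat) : zN (2*a+1) = zN a + 1 := by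
  rw [zN, zN]
  have h1 : (2*a+1) + 1 = 2*a+2 := by ring
  rw [h1, xor_odd]
  have h2 : (2*(a ^^^ (a+1)) + 1) + 1 = 2*((a ^^^ (a+1)) + 1) := by ring
  rw [h2, PySem.Int.bitLength_natCast (m := 2*((a ^^^ (a+1)) + 1)) (by omega)]
  have h3 : 2*((a ^^^ (a+1)) + 1) / 2 = (a ^^^ (a+1)) + 1 := by omega
  rw [h3, Nat.cast_add_one]
  ring

theorem find_rev_bits2 : ∀ m : Nat, 0 < m →
    PySem.Chars.find (bits2 m).reverse ['0'] =
      (if zN m < (PySem.Int.bitLength (m : Int) : Int) then zN m else -1) := by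
  intro m
  induction m using Nat.strong_induction_on with
  | _ m ih =>
    intro hm
    rw [bits2]
    by_cases h2 : m / 2 = 0
    · have hm1 : m = 1 := by omega
      subst hm1
      decide
    · simp only [dif_neg h2, List.reverse_append, List.reverse_singleton, List.singleton_append]
      have hbl : PySem.Int.bitLength (m : Int) = PySem.Int.bitLength ((m / 2 : Nat) : Int) + 1 :=
        PySem.Int.bitLength_natCast (m := m) (by omega)
      by_cases hodd : m % 2 = 1
      · have hd : Nat.digitChar (m % 2) = '1' := by rw [hodd]; rfl
        rw [hd, find_cons_ne '1' _ (by decide), ih (m / 2) (Nat.div_lt_self hm one_lt_two) (by omega)]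
        have hz : zN m = zN (m / 2) + 1 := by
          have hm2 : m = 2*(m/2)+1 := by omega
          conv_lhs => rw [hm2]
          exact zN_odd (m / 2)
        rw [hz, hbl]
        have h0 := zN_nonneg (m / 2)
        by_cases hlt : zN (m / 2) < (PySem.Int.bitLength ((m / 2 : Nat) : Int) : Int)
        · rw [if_pos hlt, if_neg (by omega), if_pos (by rw [Nat.cast_add_one]; omega)]
        · rw [if_neg hlt, if_pos rfl, if_neg (by rw [Nat.cast_add_one]; omega)]
      · have hd : Nat.digitChar (m % 2) = '0' := by
          have : m % 2 = 0 := by omega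
          rw [this]; rfl
        rw [hd, find_cons_zero]
        have hz : zN m = 0 := by
          have hm2 : m = 2*(m/2) := by omega
          conv_lhs => rw [hm2]
          exact zN_even (m / 2)
        rw [hz, if_pos (by have := blN_pos m hm; omega)]

theorem ubiA_eq_ubiB (n : Int) : ubiA n = ubiB n := by
  by_cases hz : n = 0
  · subst hz; decide
  · by_cases hneg : n < 0
    · have : PySem.Int.toBinChars0b n = '-' :: '0' :: 'b' :: Nat.toDigits 2 n.natAbs := by
        simp [PySem.Int.toBinChars0b, hneg]
      rw [ubiA]
      simp only [this]
      rw [PySem.List.slice_from _ (a := 2) (by norm_num)]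
      show PySem.Chars.find (('b' :: Nat.toDigits 2 n.natAbs).reverse) ['0'] = ubiB n
      rw [List.reverse_cons, toDigits_eq_bits2, find_append_b,
        find_rev_bits2 n.natAbs (by omega), ubiB_of_ne n (by omega)]
    · have hpos : 0 < n := by omega
      have hna : n.toNat = n.natAbs := by omega
      have : PySem.Int.toBinChars0b n = '0' :: 'b' :: Nat.toDigits 2 n.natAbs := by
        simp [PySem.Int.toBinChars0b, hneg, hna]
      rw [ubiA]
      simp only [this]
      rw [PySem.List.slice_from _ (a := 2) (by norm_num)]
      show PySem.Chars.find ((Nat.toDigits 2 n.natAbs).reverse) ['0'] = ubiB n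
      rw [toDigits_eq_bits2, find_rev_bits2 n.natAbs (by omega), ubiB_of_ne n (by omega)]

/-! ### proof-side notation for B's pipeline -/

def candE (l : List Int) (s : Int) : List (Int × Int) :=
  (PySem.List.enumerate l s).filterMap
    (fun p => if ubiB p.2 > 0 then some (-(ubiB p.2), p.1) else none)

def zerosE (l : List Int) (s : Int) : List Int :=
  (PySem.List.enumerate l s).filterMap
    (fun p => if ubiB p.2 ≥ 0 then some p.1 else none)

def dbl (ns : List Int) (q : Int × Int) : List Int :=
  PySem.List.pySetD ns q.2 (PySem.List.pyGetD ns q.2 0 * 2)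

def altF (f : Nat) (nums : List Int) : List Int :=
  let sc := PySem.List.sorted (candE nums 0) (fun q => toLex q) false
  let steps := min f sc.length
  let nums1 := (sc.take steps).foldl dbl nums
  if f - steps > 0 then
    match zerosE nums1 0 with
    | [] => nums1
    | j :: _ => PySem.List.pySetD nums1 j (PySem.List.pyGetD nums1 j 0 <<< (f - steps))
  else nums1

theorem alt_eq_altF (nums : List Int) (k : Int) :
    max_bwor_alt nums k = (altF k.toNat nums).foldl (fun res num => PySem.Int.bor res num) 0 := by
  simp only [max_bwor_alt, altF]
  by_cases hk : k > 0
  · simp only [if_pos hk]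
    simp only [candE, zerosE, PySem.List.len_eq]
    set sc := PySem.List.sorted
        (List.filterMap (fun p => if ubiB p.2 > 0 then some (-ubiB p.2, p.1) else none)
          (PySem.List.enumerate nums)) (fun q => toLex q) false with hsc
    have hsl : PySem.List.slice sc none (some (min k (sc.length : Int)))
        = sc.take (min k.toNat sc.length) := by
      rw [PySem.List.slice_to _ (b := min k (sc.length : Int)) (by omega)]
      congr 1
      omega
    rw [hsl]
    by_cases hc : k.toNat - min k.toNat sc.length > 0
    · rw [if_pos (by omega), if_pos hc]
      have ht : (k - min k (sc.length : Int)).toNat = k.toNat - min k.toNat sc.length := by omega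
      rw [ht]
      rfl
    · rw [if_neg (by omega), if_neg hc]
      rfl
  · simp only [if_neg hk]
    have h0 : k.toNat = 0 := by omega
    rw [h0, PySem.List.slice_to _ (b := 0) (by norm_num), if_neg (by omega)]
    norm_num

/-! ### scan characterization -/

def scanB (nums : List Int) : Int × Int :=
  (PySem.List.enumerate nums).foldl
    (fun acc p => if ubiB p.2 > acc.1 then (ubiB p.2, p.1) else acc) (-1, -1)

theorem scanA_eq_scanB (nums : List Int) : scanA nums = scanB nums := by
  unfold scanA scanB
  congr 1
  funext acc p
  rw [ubiA_eq_ubiB]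

theorem scan_skip : ∀ (l : List Int) (s : Int) (acc : Int × Int),
    (∀ x ∈ l, ubiB x ≤ acc.1) →
    (PySem.List.enumerate l s).foldl
      (fun acc p => if ubiB p.2 > acc.1 then (ubiB p.2, p.1) else acc) acc = acc := by
  intro l
  induction l with
  | nil => intro s acc _; simp [PySem.List.enumerate_nil]
  | cons x t ih =>
    intro s acc h
    rw [PySem.List.enumerate_cons, List.foldl_cons]
    have hx : ¬ ubiB x > acc.1 := by have := h x (by simp); omega
    simp only [hx, if_false]
    exact ih (s + 1) acc (fun y hy => h y (by simp [hy]))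

theorem scan_fst_cases : ∀ (l : List Int) (s : Int) (acc : Int × Int),
    ((PySem.List.enumerate l s).foldl
      (fun acc p => if ubiB p.2 > acc.1 then (ubiB p.2, p.1) else acc) acc).1 = acc.1 ∨
    ∃ y ∈ l, ((PySem.List.enumerate l s).foldl
      (fun acc p => if ubiB p.2 > acc.1 then (ubiB p.2, p.1) else acc) acc).1 = ubiB y := by
  intro l
  induction l with
  | nil => intro s acc; left; simp [PySem.List.enumerate_nil]
  | cons x t ih =>
    intro s acc
    rw [PySem.List.enumerate_cons, List.foldl_cons]
    by_cases hx : ubiB x > acc.1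
    · simp only [hx, if_true]
      rcases ih (s + 1) ((ubiB x, s)) with h | ⟨y, hy, h⟩
      · right; exact ⟨x, by simp, h⟩
      · right; exact ⟨y, by simp [hy], h⟩
    · simp only [hx, if_false]
      rcases ih (s + 1) acc with h | ⟨y, hy, h⟩
      · left; exact h
      · right; exact ⟨y, by simp [hy], h⟩

theorem scan_best (pre : List Int) (x : Int) (suf : List Int)
    (hpre : ∀ y ∈ pre, ubiB y < ubiB x)
    (hsuf : ∀ y ∈ suf, ubiB y ≤ ubiB x)
    (hgt : -1 < ubiB x) :
    scanB (pre ++ x :: suf) = (ubiB x, (pre.length : Int)) := by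
  unfold scanB
  rw [PySem.List.enumerate_append, List.foldl_append, PySem.List.enumerate_cons, List.foldl_cons]
  set acc1 := (PySem.List.enumerate pre 0).foldl
      (fun acc p => if ubiB p.2 > acc.1 then (ubiB p.2, p.1) else acc) (-1, -1) with hacc1
  have hlt : acc1.1 < ubiB x := by
    rcases scan_fst_cases pre 0 (-1, -1) with h | ⟨y, hy, h⟩
    · rw [← hacc1] at h; rw [h]; exact hgt
    · rw [← hacc1] at h; rw [h]; exact hpre y hy
  have : ubiB x > acc1.1 := hlt
  simp only [this, if_true]
  rw [scan_skip suf _ _ (by intro y hy; simpa using hsuf y hy)]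
  norm_num

/-! ### facts about ubiB, candE, zerosE -/

theorem ubiB_cases (x : Int) : ubiB x = -1 ∨ 0 ≤ ubiB x := by
  by_cases h : x.natAbs = 0
  · right; rw [ubiB]; simp [h]
  · rw [ubiB_of_ne x h]
    split_ifs with h1
    · right; exact zN_nonneg x.natAbs
    · left; rfl

theorem ubiB_double (x : Int) : ubiB (x * 2) = 0 := by
  by_cases hx : x = 0
  · subst hx; decide
  · have hx0 : x.natAbs ≠ 0 := Int.natAbs_ne_zero.mpr hx
    have hm : (x * 2).natAbs = 2 * x.natAbs := by
      rw [Int.natAbs_mul]; simp [Nat.mul_comm]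
    rw [ubiB_of_ne _ (by omega), hm, zN_even, if_pos]
    have := blN_pos (2 * x.natAbs) (by omega)
    omega

theorem candE_append (l1 l2 : List Int) (s : Int) :
    candE (l1 ++ l2) s = candE l1 s ++ candE l2 (s + l1.length) := by
  unfold candE
  rw [PySem.List.enumerate_append, List.filterMap_append]

theorem candE_cons (x : Int) (l : List Int) (s : Int) :
    candE (x :: l) s =
      (if ubiB x > 0 then [(-(ubiB x), s)] else []) ++ candE l (s + 1) := by
  unfold candE
  rw [PySem.List.enumerate_cons, List.filterMap_cons]
  by_cases h : ubiB x > 0 <;> simp [h]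

theorem zerosE_append (l1 l2 : List Int) (s : Int) :
    zerosE (l1 ++ l2) s = zerosE l1 s ++ zerosE l2 (s + l1.length) := by
  unfold zerosE
  rw [PySem.List.enumerate_append, List.filterMap_append]

theorem zerosE_cons (x : Int) (l : List Int) (s : Int) :
    zerosE (x :: l) s = (if ubiB x ≥ 0 then [s] else []) ++ zerosE l (s + 1) := by
  unfold zerosE
  rw [PySem.List.enumerate_cons, List.filterMap_cons]
  by_cases h : ubiB x ≥ 0 <;> simp [h]

theorem candE_eq_nil (l : List Int) (s : Int) (h : ∀ x ∈ l, ubiB x ≤ 0) : candE l s = [] := by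
  induction l generalizing s with
  | nil => simp [candE, PySem.List.enumerate_nil]
  | cons x t ih =>
    rw [candE_cons]
    have : ¬ ubiB x > 0 := by have := h x (by simp); omega
    simp only [this, if_false, List.nil_append]
    exact ih (s + 1) (fun y hy => h y (by simp [hy]))

theorem mem_candE (l : List Int) (s : Int) (q : Int × Int) (hq : q ∈ candE l s) :
    ∃ (kn : Nat) (hk : kn < l.length), q = (-(ubiB l[kn]), s + kn) ∧ 0 < ubiB l[kn] := by
  unfold candE at hq
  rw [List.mem_filterMap] at hq
  obtain ⟨p, hp, hps⟩ := hq
  rw [PySem.List.mem_enumerate_iff] at hp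
  obtain ⟨kn, hk, rfl⟩ := hp
  by_cases h : ubiB l[kn] > 0
  · rw [if_pos h] at hps
    exact ⟨kn, hk, by simp_all, h⟩
  · rw [if_neg h] at hps; exact absurd hps (by simp)

theorem candE_pairwise (l : List Int) (s : Int) :
    (candE l s).Pairwise (fun a b => a.2 < b.2) := by
  unfold candE
  rw [List.pairwise_filterMap]
  apply (PySem.List.pairwise_lt_enumerate l s).imp_of_mem
  intro p q _ _ hpq a ha b hb
  by_cases h1 : ubiB p.2 > 0
  · by_cases h2 : ubiB q.2 > 0
    · simp [h1] at ha; simp [h2] at hb; subst ha; subst hb; simpa using hpq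
    · simp [h2] at hb
  · simp [h1] at ha

theorem zerosE_head (l : List Int) : ∀ (s j : Int) (t : List Int),
    zerosE l s = j :: t →
    ∃ pre x suf, l = pre ++ x :: suf ∧ j = s + pre.length ∧ 0 ≤ ubiB x ∧
      ∀ y ∈ pre, ubiB y < 0 := by
  induction l with
  | nil => intro s j t h; simp [zerosE, PySem.List.enumerate_nil] at h
  | cons x l ih =>
    intro s j t h
    rw [zerosE_cons] at h
    by_cases hx : ubiB x ≥ 0
    · rw [if_pos hx] at h
      simp only [List.singleton_append, List.cons.injEq] at h
      exact ⟨[], x, l, rfl, by simp [h.1], hx, by simp⟩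
    · rw [if_neg hx, List.nil_append] at h
      obtain ⟨pre, y, suf, hl, hj, hy, hpre⟩ := ih (s + 1) j t h
      refine ⟨x :: pre, y, suf, by simp [hl], by simp [hj]; omega, hy, ?_⟩
      intro z hz
      rcases List.mem_cons.mp hz with rfl | hz
      · omega
      · exact hpre z hz

theorem zerosE_eq_nil (l : List Int) (s : Int) (h : zerosE l s = []) :
    ∀ x ∈ l, ubiB x = -1 := by
  induction l generalizing s with
  | nil => simp
  | cons x t ih =>
    rw [zerosE_cons] at h
    by_cases hx : ubiB x ≥ 0
    · simp [hx] at h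
    · simp only [hx, if_false, List.nil_append] at h
      intro y hy
      rcases List.mem_cons.mp hy with rfl | hy
      · rcases ubiB_cases y with h1 | h1
        · exact h1
        · omega
      · exact ih (s + 1) h y hy

/-! ### the main induction: loopA f nums = altF f nums -/

theorem sorted_candE_nil (nums : List Int)
    (h : PySem.List.sorted (candE nums 0) (fun q => toLex q) false = []) :
    candE nums 0 = [] := by
  have := PySem.List.length_sorted (candE nums 0) (fun q => toLex q) false
  rw [h] at this
  exact List.length_eq_zero_iff.mp this.symm

theorem pyGetD_decomp (pre : List Int) (x : Int) (suf : List Int) :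
    PySem.List.pyGetD (pre ++ x :: suf) (pre.length : Int) 0 = x := by
  rw [PySem.List.pyGetD_natCast]
  simp [List.getD]

theorem pySetD_decomp (pre : List Int) (x v : Int) (suf : List Int) :
    PySem.List.pySetD (pre ++ x :: suf) (pre.length : Int) v = pre ++ v :: suf := by
  rw [PySem.List.pySetD_natCast]
  induction pre with
  | nil => simp
  | cons a t ih => simp [ih]

theorem take_mem_lt (nums : List Int) (kn : Nat) :
    ∀ y ∈ nums.take kn, ∃ (s : Nat) (hs : s < nums.length), s < kn ∧ nums[s] = y := by
  intro y hy
  rw [List.mem_take_iff_getElem] at hy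
  obtain ⟨j, hj, hjy⟩ := hy
  exact ⟨j, by omega, by omega, hjy⟩

theorem candE_mem_of (l : List Int) (s : Int) (i : Nat) (hi : i < l.length) (h0 : 0 < ubiB l[i]) :
    (-(ubiB l[i]), s + i) ∈ candE l s := by
  unfold candE
  rw [List.mem_filterMap]
  refine ⟨(s + i, l[i]), ?_, by rw [if_pos h0]⟩
  rw [PySem.List.mem_enumerate_iff]
  exact ⟨i, hi, rfl⟩

theorem candE_nil_all (l : List Int) : ∀ (s : Int), candE l s = [] → ∀ x ∈ l, ubiB x ≤ 0 := by
  induction l with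
  | nil => simp
  | cons x t ih =>
    intro s h y hy
    rw [candE_cons] at h
    by_cases hx : ubiB x > 0
    · simp [hx] at h
    · rcases List.mem_cons.mp hy with rfl | hy
      · omega
      · exact ih (s + 1) (by simpa [hx] using h) y hy

theorem altF_zero (nums : List Int) : altF 0 nums = nums := by
  simp [altF]

theorem shift_double (x : Int) (f : Nat) : (x * 2) <<< f = x <<< (f + 1) := by
  rw [Int.shiftLeft_eq, Int.shiftLeft_eq, pow_succ]
  ring

theorem scanB_of_zero_head (nums pre suf : List Int) (x : Int)
    (hnums : nums = pre ++ x :: suf)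
    (hle : ∀ y ∈ nums, ubiB y ≤ 0)
    (hpre : ∀ y ∈ pre, ubiB y < 0)
    (hx : ubiB x = 0) :
    scanB nums = (0, (pre.length : Int)) := by
  subst hnums
  have h := scan_best pre x suf
    (fun y hy => by have := hpre y hy; omega)
    (fun y hy => by have := hle y (by simp [hy]); omega)
    (by omega)
  rw [hx] at h
  exact h

theorem loopA_eq_altF : ∀ (f : Nat) (nums : List Int), loopA f nums = altF f nums := by
  intro f
  induction f with
  | zero => intro nums; rw [loopA, altF_zero]
  | succ f ih =>
    intro nums
    rcases hsc : PySem.List.sorted (candE nums 0) (fun q => toLex q) false with _ | ⟨q, rest⟩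
    · have hcand : candE nums 0 = [] := sorted_candE_nil nums hsc
      have hle : ∀ x ∈ nums, ubiB x ≤ 0 := candE_nil_all nums 0 hcand
      rcases hz : zerosE nums 0 with _ | ⟨j, ztail⟩
      · -- all ubi = -1 : A breaks immediately, B never doubles
        have hall : ∀ x ∈ nums, ubiB x = -1 := zerosE_eq_nil nums 0 hz
        have hscan : scanA nums = (-1, -1) := by
          rw [scanA_eq_scanB, scanB]
          exact scan_skip nums 0 (-1, -1) (fun x hx => by rw [hall x hx])
        rw [loopA]
        simp only [hscan]
        rw [altF, hsc]
        simp only [List.length_nil, Nat.min_zero, List.take_zero, List.foldl_nil]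
        rw [if_pos (show f + 1 - 0 > 0 by omega), hz]
        simp
      · -- stabilised: every remaining round doubles the element at index j
        obtain ⟨pre, x, suf, hnums, hj, hx0, hpre⟩ := zerosE_head nums 0 j ztail hz
        have hxeq : ubiB x = 0 := le_antisymm (hle x (by rw [hnums]; simp)) hx0
        have hj' : j = (pre.length : Int) := by omega
        have hscan : scanA nums = (0, (pre.length : Int)) := by
          rw [scanA_eq_scanB]
          exact scanB_of_zero_head nums pre suf x hnums hle hpre hxeq
        rw [loopA]
        simp only [hscan]
        rw [if_neg (by norm_num)]
        have hset : PySem.List.pySetD nums ((pre.length : Int))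
            (PySem.List.pyGetD nums ((pre.length : Int)) 0 * 2) = pre ++ (x * 2) :: suf := by
          rw [hnums, pyGetD_decomp, pySetD_decomp]
        rw [hset, ih (pre ++ x * 2 :: suf)]
        have hcand' : candE (pre ++ x * 2 :: suf) 0 = [] := by
          rw [candE_append, candE_cons]
          rw [candE_eq_nil pre 0 (fun y hy => by have := hpre y hy; omega)]
          rw [candE_eq_nil suf _ (fun y hy => hle y (by rw [hnums]; simp [hy]))]
          simp [ubiB_double x]
        have hz' : zerosE (pre ++ x * 2 :: suf) 0
            = ((0 : Int) + pre.length) :: zerosE suf (0 + (pre.length : Int) + 1) := by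
          rw [zerosE_append, zerosE_cons]
          have hzp : zerosE pre 0 = [] := by
            rcases hzp : zerosE pre 0 with _ | ⟨a, t⟩
            · rfl
            · obtain ⟨p2, y2, s2, hp2, _, hy2, _⟩ := zerosE_head pre 0 a t hzp
              have := hpre y2 (by rw [hp2]; simp)
              omega
          rw [hzp]
          simp [ubiB_double x]
        have hR : altF (f + 1) nums = pre ++ (x <<< (f + 1)) :: suf := by
          rw [altF, hsc]
          simp only [List.length_nil, Nat.min_zero, List.take_zero, List.foldl_nil]
          rw [if_pos (show f + 1 - 0 > 0 by omega), hz]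
          show PySem.List.pySetD nums j (PySem.List.pyGetD nums j 0 <<< (f + 1 - 0)) = _
          rw [hj', hnums, pyGetD_decomp, pySetD_decomp, Nat.sub_zero]
        rw [hR]
        by_cases hf : f = 0
        · subst hf
          rw [altF_zero]
          have hx1 : x <<< ((0 : Nat) + 1) = x * 2 := by rw [Int.shiftLeft_eq]; norm_num
          rw [hx1]
        · rw [altF]
          have hsc' : PySem.List.sorted (candE (pre ++ x * 2 :: suf) 0) (fun q => toLex q) false = [] := by
            rw [hcand']
            rfl
          rw [hsc']
          simp only [List.length_nil, Nat.min_zero, List.take_zero, List.foldl_nil]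
          rw [if_pos (show f - 0 > 0 by omega), hz']
          show PySem.List.pySetD (pre ++ x * 2 :: suf) ((0 : Int) + pre.length)
              (PySem.List.pyGetD (pre ++ x * 2 :: suf) ((0 : Int) + pre.length) 0 <<< (f - 0)) = _
          rw [zero_add, pyGetD_decomp, pySetD_decomp, Nat.sub_zero, shift_double]
    · -- candidate phase: A doubles the head of B's sorted candidate list
      have hperm0 : (q :: rest).Perm (candE nums 0) := by
        rw [← hsc]
        exact PySem.List.sorted_perm (candE nums 0) (fun q => toLex q) false
      have hqmem : q ∈ candE nums 0 := hperm0.subset (List.mem_cons_self ..)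
      obtain ⟨kn, hk, hq, hM⟩ := mem_candE nums 0 q hqmem
      have hq' : q = (-(ubiB nums[kn]), (kn : Int)) := by rw [hq]; norm_num
      have hhead := PySem.List.key_head_sorted_le (candE nums 0) (fun q => toLex q) hsc
      have hle : ∀ y ∈ nums, ubiB y ≤ ubiB nums[kn] := by
        intro y hy
        by_cases hy0 : 0 < ubiB y
        · obtain ⟨i, hi, hiy⟩ := List.mem_iff_getElem.mp hy
          have hm : (-(ubiB nums[i]), (0 : Int) + i) ∈ candE nums 0 := candE_mem_of nums 0 i hi (by rw [hiy]; omega)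
          have hc := hhead _ hm
          rw [hq'] at hc
          rw [Prod.Lex.toLex_le_toLex] at hc
          rw [← hiy]
          rcases hc with hc | ⟨hc, _⟩ <;> simp at hc <;> omega
        · omega
      have hpre : ∀ (s : Nat) (hs : s < nums.length), s < kn → ubiB nums[s] < ubiB nums[kn] := by
        intro s hs hskn
        by_cases h0 : 0 < ubiB nums[s]
        · have hm : (-(ubiB nums[s]), (0 : Int) + s) ∈ candE nums 0 := candE_mem_of nums 0 s hs h0
          have hc := hhead _ hm
          rw [hq'] at hc
          rw [Prod.Lex.toLex_le_toLex] at hc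
          rcases hc with hc | ⟨hc1, hc2⟩
          · simp at hc; omega
          · simp at hc1 hc2; omega
        · omega
      have hdec : nums = nums.take kn ++ nums[kn] :: nums.drop (kn + 1) := by
        rw [← List.drop_eq_getElem_cons hk, List.take_append_drop]
      have hlent : (nums.take kn).length = kn := by
        rw [List.length_take]; omega
      have hscan : scanA nums = (ubiB nums[kn], (kn : Int)) := by
        rw [scanA_eq_scanB]
        have hb := scan_best (nums.take kn) nums[kn] (nums.drop (kn + 1))
          (fun y hy => by
            obtain ⟨s, hs, hskn, hsy⟩ := take_mem_lt nums kn y hy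
            rw [← hsy]
            exact hpre s hs hskn)
          (fun y hy => hle y (List.mem_of_mem_drop hy))
          (by omega)
        rw [← hdec, hlent] at hb
        exact hb
      rw [loopA]
      simp only [hscan]
      rw [if_neg (by omega)]
      have hset : PySem.List.pySetD nums ((kn : Int)) (PySem.List.pyGetD nums ((kn : Int)) 0 * 2)
          = nums.take kn ++ (nums[kn] * 2) :: nums.drop (kn + 1) := by
        conv_lhs => rw [hdec]
        rw [show ((kn : Int)) = (((nums.take kn).length : Nat) : Int) by rw [hlent]]
        rw [pyGetD_decomp, pySetD_decomp]
      rw [hset, ih (nums.take kn ++ (nums[kn] * 2) :: nums.drop (kn + 1))]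
      -- candidate lists before and after the doubling
      have hlen0 : (0 : Int) + ((nums.take kn).length : Int) = (kn : Int) := by rw [hlent]; norm_num
      have hcnums : candE nums 0
          = candE (nums.take kn) 0 ++ (-(ubiB nums[kn]), (kn : Int)) :: candE (nums.drop (kn + 1)) ((kn : Int) + 1) := by
        conv_lhs => rw [hdec]
        rw [candE_append, candE_cons, hlen0, if_pos hM]
        simp
      have hcnums' : candE (nums.take kn ++ (nums[kn] * 2) :: nums.drop (kn + 1)) 0
          = candE (nums.take kn) 0 ++ candE (nums.drop (kn + 1)) ((kn : Int) + 1) := by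
        rw [candE_append, candE_cons, hlen0, if_neg (by rw [ubiB_double]; omega)]
        simp
      have hperm2 : (candE nums 0).Perm (q :: candE (nums.take kn ++ (nums[kn] * 2) :: nums.drop (kn + 1)) 0) := by
        rw [hcnums, hcnums', hq']
        exact List.perm_middle
      have hrestperm : rest.Perm (candE (nums.take kn ++ (nums[kn] * 2) :: nums.drop (kn + 1)) 0) :=
        (hperm0.trans hperm2).cons_inv
      have hnodup : (q :: rest).Nodup := by
        have hpw := candE_pairwise nums 0
        have hnd : (candE nums 0).Nodup :=
          hpw.imp (fun hab => by intro he; rw [he] at hab; exact lt_irrefl _ hab)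
        exact hperm0.nodup_iff.mpr hnd
      have hpair : (q :: rest).Pairwise (fun a b => toLex a ≤ toLex b) := by
        rw [← hsc]
        exact PySem.List.sorted_pairwise (candE nums 0) (fun q => toLex q)
      have hpairlt : rest.Pairwise (fun a b => toLex a < toLex b) := by
        have h1 := (List.pairwise_cons.mp hpair).2
        have h2 : rest.Pairwise (fun (a b : Int × Int) => a ≠ b) := (List.nodup_cons.mp hnodup).2
        exact (h1.and h2).imp (fun ⟨hab, hne⟩ =>
          lt_of_le_of_ne hab (fun he => hne (by simpa using he)))
      have hsorted' : PySem.List.sorted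
          (candE (nums.take kn ++ (nums[kn] * 2) :: nums.drop (kn + 1)) 0) (fun q => toLex q) false = rest :=
        PySem.List.sorted_eq_of_perm_of_pairwise_lt _ _ _ hrestperm hpairlt
      rw [altF, altF, hsc, hsorted']
      simp only [List.length_cons, Nat.succ_min_succ, List.take_succ_cons, List.foldl_cons]
      have hdq : dbl nums q = nums.take kn ++ (nums[kn] * 2) :: nums.drop (kn + 1) := by
        rw [dbl, hq']
        exact hset
      rw [hdq]
      have harith : f + 1 - (min f rest.length + 1) = f - min f rest.length := by omega
      rw [harith]

-- ===== VERDICT (by name: the statement is the Claim_ definition above) =====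
theorem max_bwor_spec : Claim_equal_max_bwor := by
  intro nums k _
  unfold Spec_max_bwor
  rw [max_bwor, alt_eq_altF, loopA_eq_altF]
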